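-- pv_equiv track=rewrite | github.com/psrpsj/Algorithm | week04/프렌즈4블록/sangryu.py | solution
-- ===== SOURCE A (Python) =====
-- def solution(n, arr1, arr2):
--     answer = []
--     for idx in range(len(arr1)):
--         binary = str(bin(arr1[idx] | arr2[idx])[2:])
--         binary = binary.rjust(n, "0")
--         binary = binary.replace("1", "#")
--         binary = binary.replace("0", " ")
--         answer.append(binary)
--     return answer
-- ===== SOURCE B (Python) =====
-- def solution(n, arr1, arr2):
--     rows = []
--     for a, b in zip(arr1, arr2):
--         v = a | b
--         width = max(n, v.bit_length(), 1)
--         rows.append(''.join('#' if (v >> pos) & 1 else ' '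
--                             for pos in range(width - 1, -1, -1)))
--     return rows
-- ===== Notes on version B (the rewrite author's own statement) =====
-- stated objective: alternative
-- what changed: B replaces A's string formatting pipeline (bin() text, rjust pad, two replace passes over each row) by direct bit arithmetic: it zips the two arrays, computes the row width as max(n, v.bit_length(), 1), and emits '#'/' ' per bit position high-to-low, never building or rewriting intermediate strings.
-- outside the precondition, e.g. on solution(5, [-3], [1]): A returns ['  b##'], B returns ['### #']
import Mathlib
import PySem

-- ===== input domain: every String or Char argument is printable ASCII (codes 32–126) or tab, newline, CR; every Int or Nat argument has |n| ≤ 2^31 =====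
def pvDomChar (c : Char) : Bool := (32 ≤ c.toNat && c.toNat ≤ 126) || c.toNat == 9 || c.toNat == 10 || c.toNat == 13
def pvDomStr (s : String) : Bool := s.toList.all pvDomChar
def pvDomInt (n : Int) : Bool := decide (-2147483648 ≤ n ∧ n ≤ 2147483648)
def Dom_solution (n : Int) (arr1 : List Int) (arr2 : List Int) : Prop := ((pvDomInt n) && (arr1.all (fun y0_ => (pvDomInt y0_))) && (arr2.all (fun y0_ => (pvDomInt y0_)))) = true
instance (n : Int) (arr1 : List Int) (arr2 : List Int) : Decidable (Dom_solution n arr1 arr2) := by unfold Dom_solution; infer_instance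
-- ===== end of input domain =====

-- B renders each row by scanning bit positions of arr1[i]|arr2[i] directly (width = max(n, bit_length, 1))
-- instead of A's bin()/rjust/replace string pipeline; same result, similar cost ("alternative").
-- Pre_ excludes inputs where A raises IndexError (arr1 longer than arr2) and inputs with a negative
-- element among the scanned positions, where bin()'s '-0b' prefix makes A's row an accidental garble.


-- ===== PORT A =====
-- for idx in range(len(arr1)): binary = bin(arr1[idx]|arr2[idx])[2:]; rjust(n,'0'); replace; append
-- rjust is ported by hand (pad of '0' on the left, never truncating) — exact for every n and string.
def solution (n : Int) (arr1 : List Int) (arr2 : List Int) : List String :=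
  (PySem.List.pyRange 0 (arr1.length : Int) 1).foldl (fun answer idx =>
    let binary := PySem.Chars.slice
      (PySem.Int.toBinChars0b (PySem.Int.bor (PySem.List.pyGetD arr1 idx 0) (PySem.List.pyGetD arr2 idx 0)))
      (some 2) none
    let binary := List.replicate ((n - (binary.length : Int)).toNat) '0' ++ binary
    let binary := PySem.Chars.replace binary ['1'] ['#']
    let binary := PySem.Chars.replace binary ['0'] [' ']
    answer ++ [String.ofList binary]) []

-- ===== PORT B =====
-- for a, b in zip(arr1, arr2): v = a|b; width = max(n, v.bit_length(), 1);
--   ''.join('#' if (v >> pos) & 1 else ' ' for pos in range(width-1, -1, -1))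
-- pos.toNat is exact: every pos in range(width-1, -1, -1) is ≥ 0 (width ≥ 1).
def solution_alt (n : Int) (arr1 : List Int) (arr2 : List Int) : List String :=
  (arr1.zip arr2).foldl (fun rows ab =>
    let v := PySem.Int.bor ab.1 ab.2
    let width : Int := max n (max ((PySem.Int.bitLength v : Nat) : Int) 1)
    rows ++ [String.ofList ((PySem.List.pyRange (width - 1) (-1) (-1)).map
      (fun pos => if PySem.Int.band (v >>> pos.toNat) 1 ≠ 0 then '#' else ' '))]) []

-- ===== PRECONDITION & SPEC =====
-- Pre_ excludes (a) arr1 longer than arr2, where A raises IndexError, and (b) a negative element at a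
-- scanned position, where bin()'s sign handling makes A's row ('b'-containing garble) an accident no
-- caller would specify; elements of arr2 beyond len(arr1) are never read and stay unconstrained.
def Pre_solution (n : Int) (arr1 : List Int) (arr2 : List Int) : Prop :=
  arr1.length ≤ arr2.length ∧ (∀ x ∈ arr1, 0 ≤ x) ∧ ∀ x ∈ arr2.take arr1.length, 0 ≤ x
instance (n : Int) (arr1 : List Int) (arr2 : List Int) : Decidable (Pre_solution n arr1 arr2) := by
  unfold Pre_solution; infer_instance
def pvWitness_solution : Int × List Int × List Int := (3, [9, 20], [30, 1, 7])

def Spec_solution (n : Int) (arr1 : List Int) (arr2 : List Int) (out : List String) : Prop := out = solution_alt n arr1 arr2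
instance (n : Int) (arr1 : List Int) (arr2 : List Int) (out : List String) : Decidable (Spec_solution n arr1 arr2 out) := by unfold Spec_solution; infer_instance

-- ===== CLAIM (what is proved, stated in full; the proofs are below) =====
def Claim_equal_solution : Prop := ∀ (n : Int) (arr1 : List Int) (arr2 : List Int), Dom_solution n arr1 arr2 → Pre_solution n arr1 arr2 → Spec_solution n arr1 arr2 (solution n arr1 arr2)

-- ===== LEMMAS AND PROOFS =====

-- '1'/'0' character of bit p of m (A's bin() digits), and '#'/' ' character (the final row)
def bitChar (m p : Nat) : Char := if m.testBit p then '1' else '0'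
def hashChar (m p : Nat) : Char := if m.testBit p then '#' else ' '

-- the common row both programs produce: W characters, bit W-1-k at position k
def rowChars (m W : Nat) : List Char := (List.range W).reverse.map (hashChar m)

lemma bitLength_pos (m : Nat) (hm : 0 < m) : 0 < PySem.Int.bitLength (m : Int) := by
  rw [PySem.Int.bitLength_natCast hm]; omega

lemma bitChar_zero_eq (m : Nat) : bitChar m 0 = Nat.digitChar (m % 2) := by
  rcases Nat.mod_two_eq_zero_or_one m with h | h <;>
    simp [bitChar, Nat.testBit_zero, h, Nat.digitChar]

lemma range_rev_succ (m : Nat) (hm : 2 ≤ m) :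
    (List.range (max (PySem.Int.bitLength (m : Int)) 1)).reverse.map (bitChar m)
      = (List.range (max (PySem.Int.bitLength ((m / 2 : Nat) : Int)) 1)).reverse.map (bitChar (m / 2))
        ++ [Nat.digitChar (m % 2)] := by
  have h2 : 0 < m / 2 := by omega
  have hbl2 : 0 < PySem.Int.bitLength ((m / 2 : Nat) : Int) := bitLength_pos _ h2
  have hbl : PySem.Int.bitLength (m : Int) = PySem.Int.bitLength ((m / 2 : Nat) : Int) + 1 :=
    PySem.Int.bitLength_natCast (by omega)
  rw [hbl, Nat.max_eq_left (by omega), Nat.max_eq_left (by omega)]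
  rw [List.range_succ_eq_map, List.reverse_cons, List.map_append, List.map_reverse,
    List.map_map, List.map_reverse]
  congr 1
  · congr 1
    apply List.map_congr_left
    intro p _
    simp [Function.comp, bitChar, Nat.testBit_add_one]
  · simp [bitChar_zero_eq]

lemma toDigitsCore_small (f n : Nat) (l : List Char) (hn : n < 2) :
    Nat.toDigitsCore 2 (f + 1) n l
      = (List.range (max (PySem.Int.bitLength (n : Int)) 1)).reverse.map (bitChar n) ++ l := by
  have core : Nat.toDigitsCore 2 (f + 1) n l = Nat.digitChar (n % 2) :: l := by
    simp [Nat.toDigitsCore, Nat.div_eq_of_lt hn]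
  rw [core]
  interval_cases n
  · rw [show List.map (bitChar 0) (List.range (max (PySem.Int.bitLength ((0 : Nat) : Int)) 1)).reverse
        = ['0'] from by decide]
    rw [show Nat.digitChar (0 % 2) = '0' from by decide]
    rfl
  · rw [show List.map (bitChar 1) (List.range (max (PySem.Int.bitLength ((1 : Nat) : Int)) 1)).reverse
        = ['1'] from by decide]
    rw [show Nat.digitChar (1 % 2) = '1' from by decide]
    rfl

lemma toDigitsCore_eq (f : Nat) :
    ∀ (n : Nat) (l : List Char), n < 2 ^ (f + 1) →
      Nat.toDigitsCore 2 (f + 1) n l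
        = (List.range (max (PySem.Int.bitLength (n : Int)) 1)).reverse.map (bitChar n) ++ l := by
  induction f with
  | zero => intro n l hn; exact toDigitsCore_small 0 n l (by simpa using hn)
  | succ f ih =>
    intro n l hn
    by_cases hsmall : n < 2
    · exact toDigitsCore_small (f + 1) n l hsmall
    · have hdiv : ¬ n / 2 = 0 := by omega
      have step : Nat.toDigitsCore 2 (f + 1 + 1) n l
          = Nat.toDigitsCore 2 (f + 1) (n / 2) (Nat.digitChar (n % 2) :: l) := by
        simp [Nat.toDigitsCore, hdiv]
      rw [step, ih (n / 2) _ (by omega), range_rev_succ n (by omega)]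
      simp

lemma toDigits_eq (m : Nat) :
    Nat.toDigits 2 m
      = (List.range (max (PySem.Int.bitLength (m : Int)) 1)).reverse.map (bitChar m) := by
  have := toDigitsCore_eq m m [] (lt_of_lt_of_le Nat.lt_two_pow_self (by
    exact Nat.pow_le_pow_right (by omega) (by omega)))
  simpa [Nat.toDigits] using this

-- replace with a single-character pattern is a character map
lemma replace_go_single (a b : Char) :
    ∀ (fuel : Nat) (l acc : List Char), l.length ≤ fuel →
      PySem.Chars.replace.go [a] [b] fuel l acc
        = acc.reverse ++ l.map (fun c => if c = a then b else c) := by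
  intro fuel
  induction fuel with
  | zero =>
    intro l acc h
    have : l = [] := List.eq_nil_of_length_eq_zero (by omega)
    subst this; simp [PySem.Chars.replace.go]
  | succ fuel ih =>
    intro l acc h
    cases l with
    | nil => simp [PySem.Chars.replace.go]
    | cons c t =>
      by_cases hc : a = c
      · subst hc
        have hpre : [a].isPrefixOf (a :: t) = true := by simp [List.isPrefixOf]
        simp only [PySem.Chars.replace.go, hpre, if_true, List.length_cons, List.length_nil,
          List.drop_succ_cons, List.drop_zero, List.reverse_cons, List.reverse_nil,
          List.nil_append, List.singleton_append]
        rw [ih t (b :: acc) (by simpa using Nat.le_of_succ_le_succ h)]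
        simp
      · have hpre : [a].isPrefixOf (c :: t) = false := by
          simp only [List.isPrefixOf, Bool.and_true, beq_eq_false_iff_ne, ne_eq]
          exact fun hh : a = c => hc hh
        simp only [PySem.Chars.replace.go, hpre]
        rw [if_neg (by simp), ih t (c :: acc) (by simpa using Nat.le_of_succ_le_succ h)]
        have hca : ¬ c = a := fun hh : c = a => hc hh.symm
        simp [hca]

lemma replace_single (a b : Char) (cs : List Char) :
    PySem.Chars.replace cs [a] [b] = cs.map (fun c => if c = a then b else c) := by
  rw [PySem.Chars.replace]
  simp only [List.isEmpty_cons]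
  simpa using replace_go_single a b cs.length cs [] le_rfl

-- the rjust pad of '0's is exactly the high zero bits of the wider row
lemma pad_rowChars (m w0 k : Nat) (h : PySem.Int.bitLength (m : Int) ≤ w0) :
    rowChars m (w0 + k) = List.replicate k ' ' ++ rowChars m w0 := by
  unfold rowChars
  rw [List.range_add, List.reverse_append, List.map_append]
  congr 1
  have hz : ∀ p ∈ (List.map (fun x => w0 + x) (List.range k)).reverse, hashChar m p = ' ' := by
    intro p hp
    simp only [List.mem_reverse, List.mem_map, List.mem_range] at hp
    obtain ⟨x, _, rfl⟩ := hp
    have : m < 2 ^ (w0 + x) := by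
      calc m = (m : Int).natAbs := by simp
        _ < 2 ^ PySem.Int.bitLength (m : Int) := PySem.Int.lt_two_pow_bitLength _
        _ ≤ 2 ^ (w0 + x) := Nat.pow_le_pow_right (by omega) (by omega)
    simp [hashChar, Nat.testBit_eq_false_of_lt this]
  rw [List.map_congr_left hz]
  simp [Function.comp_def, List.map_const', List.reverse_replicate]

-- A's row for a nonnegative pair value equals rowChars
lemma rowA_eq (n : Int) (m : Nat) :
    (PySem.Chars.replace (PySem.Chars.replace
        (List.replicate ((n - ((PySem.Chars.slice (PySem.Int.toBinChars0b (m : Int)) (some 2) none).length : Int)).toNat) '0'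
          ++ PySem.Chars.slice (PySem.Int.toBinChars0b (m : Int)) (some 2) none)
        ['1'] ['#']) ['0'] [' '])
      = rowChars m (max n.toNat (max (PySem.Int.bitLength (m : Int)) 1)) := by
  have hslice : PySem.Chars.slice (PySem.Int.toBinChars0b (m : Int)) (some 2) none
      = Nat.toDigits 2 m := by
    rw [PySem.Chars.slice_eq_listSlice, PySem.List.slice_from _ (show (0:Int) ≤ 2 by omega)]
    rw [show PySem.Int.toBinChars0b ((m : Nat) : Int) = '0' :: 'b' :: Nat.toDigits 2 m from by
      simp [PySem.Int.toBinChars0b, Int.not_lt.mpr (Int.natCast_nonneg m)]]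
    simp
  set w0 := max (PySem.Int.bitLength (m : Int)) 1 with hw0
  have hlen : (PySem.Chars.slice (PySem.Int.toBinChars0b (m : Int)) (some 2) none).length = w0 := by
    rw [hslice, toDigits_eq]; simp [hw0]
  rw [replace_single, replace_single, hlen, hslice, toDigits_eq]
  simp only [List.map_append, List.map_map]
  rw [← hw0]
  have hW : max n.toNat w0 = w0 + (n - (w0 : Int)).toNat := by omega
  rw [hW, pad_rowChars m w0 _ (by omega)]
  congr 1
  · rw [List.map_replicate,
      show ((fun c => if c = '0' then ' ' else c) ∘ fun c => if c = '1' then '#' else c) '0'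
        = ' ' from by decide]
  · unfold rowChars
    apply List.map_congr_left
    intro p _
    by_cases hb : m.testBit p <;> simp [bitChar, hashChar, hb, Function.comp_def]

-- B's row for a nonnegative pair value equals rowChars
lemma rowB_eq (n : Int) (m : Nat) :
    ((PySem.List.pyRange (max n (max ((PySem.Int.bitLength ((m : Nat) : Int) : Nat) : Int) 1) - 1) (-1) (-1)).map
      (fun pos => if PySem.Int.band (((m : Nat) : Int) >>> pos.toNat) 1 ≠ 0 then '#' else ' '))
      = rowChars m (max n.toNat (max (PySem.Int.bitLength (m : Int)) 1)) := by
  set w0 := max (PySem.Int.bitLength (m : Int)) 1 with hw0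
  have hmax : max n (max ((PySem.Int.bitLength ((m : Nat) : Int) : Nat) : Int) 1) = (max n.toNat w0 : Nat) := by
    push_cast [hw0]; omega
  set W := max n.toNat w0 with hWdef
  have hW1 : 1 ≤ W := by omega
  rw [hmax, PySem.List.pyRange_neg_one]
  have hcnt : (((W : Nat) : Int) - 1 - (-1)).toNat = W := by omega
  rw [hcnt]
  unfold rowChars
  apply List.ext_getElem
  · simp
  · intro k h1 h2
    simp only [List.getElem_map, List.getElem_reverse, List.getElem_range,
      List.length_map, List.length_range] at h1 h2 ⊢
    have hk : k < W := by simpa using h1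
    have hpos : ((W : Nat) : Int) - 1 - (k : Nat) = ((W - 1 - k : Nat) : Int) := by omega
    rw [hpos, Int.toNat_natCast, Int.shiftRight_natCast]
    have hband : PySem.Int.band ((m >>> (W - 1 - k) : Nat) : Int) 1
        = (((m >>> (W - 1 - k)) &&& 1 : Nat) : Int) := by
      exact_mod_cast PySem.Int.band_natCast (m >>> (W - 1 - k)) 1
    rw [hband]
    have hbit : ((m >>> (W - 1 - k)) &&& 1 : Nat) = if m.testBit (W - 1 - k) then 1 else 0 := by
      rw [Nat.and_one_is_mod, Nat.shiftRight_eq_div_pow, Nat.testBit_eq_decide_div_mod_eq]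
      by_cases hc : m / 2 ^ (W - 1 - k) % 2 = 1
      · simp [hc]
      · simp [hc]
        omega
    rw [hbit]
    by_cases hb : m.testBit (W - 1 - k) <;> simp [hb, hashChar]

-- per-pair equality of the two row strings
lemma row_eq (n a b : Int) (ha : 0 ≤ a) (hb : 0 ≤ b) :
    String.ofList (PySem.Chars.replace (PySem.Chars.replace
        (List.replicate ((n - ((PySem.Chars.slice (PySem.Int.toBinChars0b (PySem.Int.bor a b)) (some 2) none).length : Int)).toNat) '0'
          ++ PySem.Chars.slice (PySem.Int.toBinChars0b (PySem.Int.bor a b)) (some 2) none)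
        ['1'] ['#']) ['0'] [' '])
      = String.ofList ((PySem.List.pyRange (max n (max ((PySem.Int.bitLength (PySem.Int.bor a b) : Nat) : Int) 1) - 1) (-1) (-1)).map
      (fun pos => if PySem.Int.band (PySem.Int.bor a b >>> pos.toNat) 1 ≠ 0 then '#' else ' ')) := by
  have hbor : PySem.Int.bor a b = ((a.toNat ||| b.toNat : Nat) : Int) :=
    PySem.Int.bor_of_nonneg ha hb
  rw [hbor]
  congr 1
  rw [rowA_eq n (a.toNat ||| b.toNat)]
  exact (rowB_eq n (a.toNat ||| b.toNat)).symm

-- ===== VERDICT (by name: the statement is the Claim_ definition above) =====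
theorem solution_spec : Claim_equal_solution := by
  intro n arr1 arr2 _ hpre
  obtain ⟨hlen, h1, h2⟩ := hpre
  unfold Spec_solution solution solution_alt
  rw [PySem.List.foldl_append_singleton_eq_map, PySem.List.foldl_append_singleton_eq_map]
  simp only [List.nil_append]
  rw [PySem.List.pyRange_one]
  simp only [sub_zero, Int.toNat_natCast, List.map_map]
  apply List.ext_getElem
  · simp
    exact hlen
  · intro k h1' h2'
    simp only [List.length_map, List.length_range] at h1'
    simp only [List.getElem_map, List.getElem_range, List.getElem_zip, Function.comp]
    have hk2 : k < arr2.length := by omega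
    have hget1 : PySem.List.pyGetD arr1 ((0 : Int) + (k : Nat)) 0 = arr1[k] := by
      rw [zero_add, PySem.List.pyGetD_natCast]
      exact List.getD_eq_getElem arr1 0 h1'
    have hget2 : PySem.List.pyGetD arr2 ((0 : Int) + (k : Nat)) 0 = arr2[k] := by
      rw [zero_add, PySem.List.pyGetD_natCast]
      exact List.getD_eq_getElem arr2 0 hk2
    have hn1 : 0 ≤ arr1[k] := h1 _ (List.getElem_mem h1')
    have hn2 : 0 ≤ arr2[k] := by
      have hklt : k < (arr2.take arr1.length).length := by
        simp [List.length_take]; omega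
      have hEq : (arr2.take arr1.length)[k] = arr2[k] := List.getElem_take
      exact h2 _ (hEq ▸ List.getElem_mem hklt)
    simp only [hget1, hget2]
    exact row_eq n arr1[k] arr2[k] hn1 hn2
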